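-- pv_equiv track=rewrite | github.com/yofn/pyacm | codeforces/stringSuffixStructure字符串后缀结构/1900/535D恢复文本.py | f
-- ===== SOURCE A (Python) =====
-- def preZ(s):    #preprocessing by Z algo
--     n    = len(s)
--     z    = [0]*n
--     z[0] = n
--     r    = 0
--     if n==1: return z
--     while r+1<n and s[r]==s[r+1]: r+=1
--     z[1] = r #note z=length! not 0-indexed
--     l    = 1 if r>0 else 0
--     for k in range(2,n):
--         bl = r+1-k  #|\beta|
--         gl = z[k-l] #|\gamma|
--         if gl<bl:
--             z[k]=z[k-l] #Case2a
--         else: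
--             j=max(0,r-k+1)  #Case1 & 2b
--             while k+j<n and s[j]==s[k+j]: j+=1
--             z[k]=j
--             l,r =k,k+j-1
--     return z
--
-- pp = int(1e9)+7
--
-- def binpow(b,e):
--     r = 1
--     while True:
--         if e &1: r=(r*b)%pp
--         e = e>>1
--         if e==0: break
--         b = (b*b)%pp
--     return r
--
-- def f(p,l,n):  #pattern, match list, size of text
--     m  = len(p)
--     if len(l)==0:
--         return binpow(26,n)
--     z  = preZ(p)
--     s  = set([i for i in range(m) if z[i]+i==m])
--     fc = l[0]-1
--     for i in range(1,len(l)):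
--         r  = l[i-1]+m
--         if l[i]>r:
--             fc += l[i]-r
--             continue
--         if l[i]<r and l[i]-l[i-1] not in s:
--             return 0
--     fc += n-(l[-1]+m-1)
--     return binpow(26,fc)
-- ===== SOURCE B (Python) =====
-- pp = 10 ** 9 + 7
--
-- def f(p, l, n):  # pattern, match list, size of text
--     if not l:
--         return pow(26, n, pp)
--     m = len(p)
--     fc = l[0] - 1 + n - (l[-1] + m - 1)
--     for a, b in zip(l, l[1:]):
--         d = b - a
--         if d >= m:
--             fc += d - m
--         elif not (0 <= d and p[d:] == p[:m - d]):
--             return 0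
--     return pow(26, fc, pp)
-- ===== Notes on version B (the rewrite author's own statement) =====
-- stated objective: simpler
-- what changed: Drops the linear-time Z-algorithm preprocessing and the precomputed shift set entirely: B checks each needed self-overlap shift d on demand by a direct slice comparison p[d:] == p[:m-d] inside one pass over consecutive match pairs, accumulates the free-character count up front, and uses Python's built-in three-argument pow instead of the hand-rolled binpow.
import Mathlib
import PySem

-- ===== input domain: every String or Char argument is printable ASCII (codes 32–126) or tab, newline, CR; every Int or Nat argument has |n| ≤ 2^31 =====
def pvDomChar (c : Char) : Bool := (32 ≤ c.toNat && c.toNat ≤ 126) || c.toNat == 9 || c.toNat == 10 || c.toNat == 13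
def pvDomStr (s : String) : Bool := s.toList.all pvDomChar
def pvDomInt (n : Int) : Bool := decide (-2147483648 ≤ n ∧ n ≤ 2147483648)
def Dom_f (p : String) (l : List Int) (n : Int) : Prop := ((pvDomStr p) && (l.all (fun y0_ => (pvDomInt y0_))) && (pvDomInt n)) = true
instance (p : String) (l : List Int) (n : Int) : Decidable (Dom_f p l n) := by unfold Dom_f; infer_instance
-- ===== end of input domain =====

-- B drops A's Z-algorithm preprocessing and precomputed shift set in favour of an on-demand
-- slice comparison per overlapping pair (objective: simpler; not claimed faster).

-- ===== PORT A =====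

def pvPP : Int := 1000000007   -- pp = int(1e9)+7 (int(1e9) is exactly 10^9)

-- 'while k+j < n and s[j] == s[k+j]: j += 1' (used for the z[1] scan with k = 1 and in the main loop)
def pvScan (s : List Char) (k : Nat) (j : Nat) : Nat :=
  if _h : k + j < s.length ∧ s.getD j ' ' = s.getD (k + j) ' ' then pvScan s k (j + 1) else j
termination_by s.length - (k + j)
decreasing_by omega

-- 'for k in range(2, n): …' of preZ, carrying (z, l, r)
def pvZMain (s : List Char) (k : Nat) (z : List Nat) (l r : Nat) : List Nat :=
  if _hk : k < s.length then
    -- bl = r+1-k, gl = z[k-l]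
    if (z.getD (k - l) 0 : Int) < (r : Int) + 1 - (k : Int) then
      pvZMain s (k + 1) (z.set k (z.getD (k - l) 0)) l r                     -- Case2a: z[k] = z[k-l]
    else
      -- j = max(0, r-k+1) extended by the while loop; then z[k] = j; l, r = k, k+j-1
      pvZMain s (k + 1) (z.set k (pvScan s k (((r : Int) - (k : Int) + 1).toNat)))
        k (k + pvScan s k (((r : Int) - (k : Int) + 1).toNat) - 1)
  else z
termination_by s.length - k

def pvPreZ (s : List Char) : List Nat :=
  let n := s.length
  if n = 0 then [] else            -- Python raises IndexError at 'z[0] = n' on the empty string; unreached under Pre_f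
  let z := (List.replicate n 0).set 0 n
  if n = 1 then z else
  let r := pvScan s 1 0
  let z := z.set 1 r
  let l := if r > 0 then 1 else 0
  pvZMain s 2 z l r

-- binpow's do-while loop on a nonnegative exponent
def pvBinpowAux (b : Int) (e : Nat) (r : Int) : Int :=
  -- one loop iteration: 'if e & 1: r = r*b %% pp; e >>= 1; if e == 0: break; b = b*b %% pp'
  if _h : e / 2 = 0 then (if e % 2 = 1 then (r * b) % pvPP else r)
  else pvBinpowAux ((b * b) % pvPP) (e / 2) (if e % 2 = 1 then (r * b) % pvPP else r)
termination_by e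
decreasing_by exact Nat.div_lt_self (by omega) (by omega)

def pvBinpow (b e : Int) : Int :=
  if e < 0 then 0 else pvBinpowAux b e.toNat 1   -- Python's binpow loops forever for e < 0 (e >> 1 never reaches 0); unreached under Pre_f

-- 'for i in range(1, len(l)): …' of f; none = the 'return 0' exit
def pvALoop (lst : List Int) (m : Int) (s : PySem.Set Int) (i : Nat) (fc : Int) : Option Int :=
  if _h : i < lst.length then
    let r := lst.getD (i - 1) 0 + m
    let li := lst.getD i 0
    if li > r then pvALoop lst m s (i + 1) (fc + (li - r))
    else if li < r ∧ (li - lst.getD (i - 1) 0) ∉ s then none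
    else pvALoop lst m s (i + 1) fc
  else some fc
termination_by lst.length - i

def f (p : String) (l : List Int) (n : Int) : Int :=
  let m : Int := (p.toList.length : Int)
  if l.length = 0 then pvBinpow 26 n
  else
    let z := pvPreZ p.toList
    let s : PySem.Set Int :=
      PySem.Set.ofList ((PySem.List.pyRange 0 m 1).filter (fun i => (z.getD i.toNat 0 : Int) + i = m))
    match pvALoop l m s 1 (PySem.List.pyGetD l 0 0 - 1) with
    | none => 0
    | some fc => pvBinpow 26 (fc + (n - (PySem.List.pyGetD l (-1) 0 + m - 1)))

-- ===== PORT B =====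

-- pow(b, e, pp): square-and-multiply (Python computes a modular inverse for e < 0; unreached under Pre_f)
def pvPowModAux (b : Int) (e : Nat) : Int :=
  if _h : e = 0 then 1
  else if e % 2 = 1 then (pvPowModAux ((b * b) % pvPP) (e / 2) * b) % pvPP
  else pvPowModAux ((b * b) % pvPP) (e / 2)
termination_by e
decreasing_by all_goals exact Nat.div_lt_self (by omega) (by omega)

def pvPowMod (b e : Int) : Int :=
  if e < 0 then 0 else pvPowModAux (b % pvPP) e.toNat

-- 'for a, b in zip(l, l[1:]): …' of B; none = the 'return 0' exit.
-- p[d:] and p[:m-d] for 0 ≤ d < m are exactly drop d.toNat / take (m-d).toNat.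
def pvBLoop (s : List Char) (m : Int) : List (Int × Int) → Int → Option Int
  | [], fc => some fc
  | (a, b) :: rest, fc =>
    let d := b - a
    if d ≥ m then pvBLoop s m rest (fc + (d - m))
    else if ¬ (0 ≤ d ∧ s.drop d.toNat = s.take (m - d).toNat) then none
    else pvBLoop s m rest fc

def f_alt (p : String) (l : List Int) (n : Int) : Int :=
  if l = [] then pvPowMod 26 n
  else
    let m : Int := (p.toList.length : Int)
    let fc := PySem.List.pyGetD l 0 0 - 1 + n - (PySem.List.pyGetD l (-1) 0 + m - 1)
    match pvBLoop p.toList m (l.zip l.tail) fc with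
    | none => 0
    | some fc => pvPowMod 26 fc

-- ===== PRECONDITION & SPEC =====

-- shift d is a consistent self-overlap of the pattern
def pvOverlapOK (cs : List Char) (m d : Int) : Bool :=
  decide (0 ≤ d) && decide (d < m) && decide (cs.drop d.toNat = cs.take (m - d).toNat)

-- some consecutive pair of matches overlaps inconsistently, forcing answer 0
def pvForcedZero (cs : List Char) (m : Int) (l : List Int) : Bool :=
  (l.zip l.tail).any (fun ab => decide (ab.2 - ab.1 < m) && ! pvOverlapOK cs m (ab.2 - ab.1))

-- number of text positions not dictated by the pattern occurrences
def pvFree (m : Int) (l : List Int) (n : Int) : Int :=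
  (PySem.List.pyGetD l 0 0 - 1)
    + ((l.zip l.tail).map (fun ab => max 0 (ab.2 - ab.1 - m))).sum
    + (n - (PySem.List.pyGetD l (-1) 0 + m - 1))

-- Pre_f excludes exactly the inputs on which Python's A does not return: it raises IndexError when p is
-- empty with l nonempty, and its binpow loops forever on a negative exponent (l = [] with n < 0, or a
-- negative free-character count with no forced-zero pair).
def Pre_f (p : String) (l : List Int) (n : Int) : Prop :=
  if l = [] then 0 ≤ n
  else p ≠ "" ∧ (pvForcedZero p.toList (p.toList.length : Int) l = true ∨ 0 ≤ pvFree (p.toList.length : Int) l n)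
instance (p : String) (l : List Int) (n : Int) : Decidable (Pre_f p l n) := by unfold Pre_f; infer_instance

def pvWitness_f : String × List Int × Int := ("ab", [1, 5], 8)

def Spec_f (p : String) (l : List Int) (n : Int) (out : Int) : Prop := out = f_alt p l n
instance (p : String) (l : List Int) (n : Int) (out : Int) : Decidable (Spec_f p l n out) := by unfold Spec_f; infer_instance

-- ===== CLAIM (what is proved, stated in full; the proofs are below) =====
def Claim_equal_f : Prop := ∀ (p : String) (l : List Int) (n : Int), Dom_f p l n → Pre_f p l n → Spec_f p l n (f p l n)

-- ===== LEMMAS AND PROOFS =====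

-- length of the longest common prefix
def pvLcp : List Char → List Char → Nat
  | a :: as, b :: bs => if a = b then pvLcp as bs + 1 else 0
  | _, _ => 0

-- the Z-function A's preZ is meant to compute
def pvZ (s : List Char) (i : Nat) : Nat := pvLcp s (s.drop i)

theorem pvLcp_le (x y : List Char) : pvLcp x y ≤ x.length ∧ pvLcp x y ≤ y.length := by
  induction x generalizing y with
  | nil => simp [pvLcp]
  | cons a as ih =>
    cases y with
    | nil => simp [pvLcp]
    | cons b bs =>
      simp only [pvLcp]
      split
      · have := ih bs
        simp only [List.length_cons]
        omega
      · simp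

theorem pvLcp_matches (x y : List Char) : ∀ i < pvLcp x y, x[i]? = y[i]? := by
  induction x generalizing y with
  | nil => simp [pvLcp]
  | cons a as ih =>
    cases y with
    | nil => simp [pvLcp]
    | cons b bs =>
      intro i hi
      simp only [pvLcp] at hi
      split at hi
      · cases i with
        | zero => simp [*]
        | succ i' => simpa using ih bs i' (by omega)
      · omega

theorem pvLcp_stop (x y : List Char) : pvLcp x y = y.length ∨ x[pvLcp x y]? ≠ y[pvLcp x y]? := by
  induction x generalizing y with
  | nil =>
    cases y with
    | nil => left; simp [pvLcp]
    | cons b bs => right; simp [pvLcp]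
  | cons a as ih =>
    cases y with
    | nil => left; simp [pvLcp]
    | cons b bs =>
      simp only [pvLcp]
      split
      · rcases ih bs with h | h
        · left; simp [h]
        · right; simpa using h
      · right; simpa using ‹¬ a = b›

theorem pvLcp_eq_of (x y : List Char) (j : Nat) (hx : j ≤ x.length) (hy : j ≤ y.length)
    (hm : ∀ i < j, x[i]? = y[i]?) (hs : j = y.length ∨ x[j]? ≠ y[j]?) : pvLcp x y = j := by
  rcases Nat.lt_trichotomy (pvLcp x y) j with h | h | h
  · -- lcp < j : contradiction with stop of lcp
    exfalso
    rcases pvLcp_stop x y with hstop | hstop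
    · omega
    · exact hstop (hm _ h)
  · exact h
  · -- j < lcp : matches at j contradict hs
    exfalso
    have hmm := pvLcp_matches x y j h
    rcases hs with rfl | hne
    · have := (pvLcp_le x y).2; omega
    · exact hne hmm

theorem pvZ_eq_of (s : List Char) (k j : Nat) (h : k + j ≤ s.length)
    (hm : ∀ i < j, s[i]? = s[k + i]?) (hs : k + j = s.length ∨ s[j]? ≠ s[k + j]?) :
    pvZ s k = j := by
  unfold pvZ
  apply pvLcp_eq_of
  · omega
  · simp; omega
  · intro i hi
    rw [List.getElem?_drop]
    exact hm i hi
  · rcases hs with h1 | h1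
    · left; simp; omega
    · right; rw [List.getElem?_drop]; exact h1

theorem pvZ_matches (s : List Char) (k : Nat) : ∀ i < pvZ s k, s[i]? = s[k + i]? := by
  intro i hi
  have := pvLcp_matches s (s.drop k) i hi
  rwa [List.getElem?_drop] at this

theorem pvZ_le (s : List Char) (k : Nat) : k + pvZ s k ≤ s.length ∨ pvZ s k = 0 := by
  unfold pvZ
  have := (pvLcp_le s (s.drop k)).2
  simp at this
  omega

theorem pvZ_stop (s : List Char) (k : Nat) (hk : k ≤ s.length) :
    k + pvZ s k = s.length ∨ s[pvZ s k]? ≠ s[k + pvZ s k]? := by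
  rcases pvLcp_stop s (s.drop k) with h | h
  · left; unfold pvZ; simp at h; omega
  · right; rwa [List.getElem?_drop] at h

theorem pvZ_zero (s : List Char) : pvZ s 0 = s.length := by
  apply pvZ_eq_of <;> simp

theorem pvScan_eq (s : List Char) (k : Nat) (hk : 1 ≤ k) :
    ∀ j, k + j ≤ s.length → (∀ i < j, s[i]? = s[k + i]?) → pvScan s k j = pvZ s k := by
  intro j
  fun_induction pvScan s k j with
  | case1 j h ih =>
    intro hj hm
    apply ih (by omega)
    intro i hi
    rcases Nat.lt_or_ge i j with hij | hij
    · exact hm i hij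
    · have hij' : i = j := by omega
      subst hij'
      have h1 : i < s.length := by omega
      have h2 : k + i < s.length := h.1
      rw [List.getElem?_eq_getElem h1, List.getElem?_eq_getElem h2]
      have hv := h.2
      rw [List.getD_eq_getElem s ' ' h1, List.getD_eq_getElem s ' ' h2] at hv
      exact congrArg some hv
  | case2 j h =>
    intro hj hm
    symm
    apply pvZ_eq_of s k j hj hm
    by_cases hlt : k + j < s.length
    · right
      have h1 : j < s.length := by omega
      rw [List.getElem?_eq_getElem h1, List.getElem?_eq_getElem hlt]
      intro hcon
      apply h
      refine ⟨hlt, ?_⟩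
      rw [List.getD_eq_getElem s ' ' h1, List.getD_eq_getElem s ' ' hlt]
      simpa using hcon
    · left; omega

theorem pvGetD_set_self (z : List Nat) (k v : Nat) (h : k < z.length) :
    (z.set k v).getD k 0 = v := by
  simp [List.getD_eq_getElem?_getD, List.getElem?_set, h]

theorem pvGetD_set_ne (z : List Nat) (k v j : Nat) (h : j ≠ k) :
    (z.set k v).getD j 0 = z.getD j 0 := by
  simp [List.getD_eq_getElem?_getD, List.getElem?_set, (Ne.symm h)]

-- case 2a of the Z algorithm: inside the box and strictly shorter, the value copies over
theorem pvZ_case2a (s : List Char) (k l r : Nat) (hl : 1 ≤ l) (hlk : l < k)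
    (hr : r < s.length)
    (hbox : ∀ i, l + i ≤ r → s[i]? = s[l + i]?)
    (hglt : k + pvZ s (k - l) ≤ r) :
    pvZ s k = pvZ s (k - l) := by
  set g := pvZ s (k - l) with hg
  apply pvZ_eq_of s k g (by omega)
  · intro i hi
    have h1 := pvZ_matches s (k - l) i hi
    have h2 := hbox ((k - l) + i) (by omega)
    have h3 : l + ((k - l) + i) = k + i := by omega
    rw [h3] at h2
    rw [h1, ← h2]
  · rcases pvZ_stop s (k - l) (by omega) with hstop | hstop
    · exfalso; omega
    · right
      have h2 := hbox ((k - l) + g) (by omega)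
      have h3 : l + ((k - l) + g) = k + g := by omega
      rw [h3] at h2
      rw [← h2]
      exact hstop

theorem pvZMain_correct (s : List Char) :
    ∀ k z l r, 2 ≤ k → l < k → (l = 0 → r = 0) → r < s.length →
      z.length = s.length →
      (∀ j < k, z.getD j 0 = pvZ s j) →
      (∀ i, l + i ≤ r → s[i]? = s[l + i]?) →
      ∀ j < s.length, (pvZMain s k z l r).getD j 0 = pvZ s j := by
  intro k z l r
  fun_induction pvZMain s k z l r with
  | case1 k z l r hklen hcond ih =>
    -- gl < bl : copy branch
    intro hk2 hlk hl0 hr hz hzk hbox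
    have hl1 : 1 ≤ l := by
      by_contra hc
      have h0 : l = 0 := by omega
      have := hl0 h0
      omega
    have hgl : z.getD (k - l) 0 = pvZ s (k - l) := hzk (k - l) (by omega)
    have hble : k + pvZ s (k - l) ≤ r := by
      rw [hgl] at hcond
      omega
    have hzk' := pvZ_case2a s k l r hl1 hlk hr hbox hble
    apply ih (by omega) (by omega) hl0 hr (by simpa using hz)
    · intro j hj
      rcases Nat.lt_or_ge j k with hjk | hjk
      · rw [pvGetD_set_ne z k _ j (by omega)]
        exact hzk j hjk
      · have : j = k := by omega
        subst this
        rw [pvGetD_set_self z j _ (by omega)]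
        rw [hgl, hzk']
    · exact hbox
  | case2 k z l r hklen hcond ih =>
    -- else branch: rescan
    intro hk2 hlk hl0 hr hz hzk hbox
    have hscan : pvScan s k (((r : Int) - (k : Int) + 1).toNat) = pvZ s k := by
      rcases Nat.lt_or_ge r k with hrk | hrk
      · -- box ends before k : scan from 0
        have hj0 : ((r : Int) - (k : Int) + 1).toNat = 0 := by omega
        rw [hj0]
        exact pvScan_eq s k (by omega) 0 (by omega) (by omega)
      · -- k ≤ r : start from r - k + 1 using the box
        have hl1 : 1 ≤ l := by
          by_contra hc
          have h0 : l = 0 := by omega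
          have := hl0 h0
          omega
        have hglb : (r : Int) + 1 - (k : Int) ≤ (pvZ s (k - l) : Int) := by
          rw [hzk (k - l) (by omega)] at hcond
          omega
        have hj0 : ((r : Int) - (k : Int) + 1).toNat = r - k + 1 := by omega
        rw [hj0]
        apply pvScan_eq s k (by omega) (r - k + 1) (by omega)
        intro i hi
        have hig : i < pvZ s (k - l) := by omega
        have h1 := pvZ_matches s (k - l) i hig
        have h2 := hbox ((k - l) + i) (by omega)
        have h3 : l + ((k - l) + i) = k + i := by omega
        rw [h3] at h2
        rw [h1, ← h2]
    have hrange : k + pvZ s k ≤ s.length ∨ pvZ s k = 0 := pvZ_le s k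
    apply ih (by omega) (by omega) (by omega) (by rw [hscan]; omega) (by simpa using hz)
    · intro j' hj'
      rcases Nat.lt_or_ge j' k with hjk | hjk
      · rw [pvGetD_set_ne z k _ j' (by omega)]
        exact hzk j' hjk
      · have : j' = k := by omega
        subst this
        rw [pvGetD_set_self z j' _ (by omega)]
        exact hscan
    · intro i hi
      rw [hscan] at hi
      exact pvZ_matches s k i (by omega)
  | case3 k z l r hklen =>
    intro hk2 hlk hl0 hr hz hzk hbox
    intro j hj
    exact hzk j (by omega)

theorem pvPreZ_eq (s : List Char) (hs : s ≠ []) :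
    ∀ i < s.length, (pvPreZ s).getD i 0 = pvZ s i := by
  intro i hi
  have hn : 1 ≤ s.length := by
    have := List.length_pos_iff.mpr hs
    omega
  unfold pvPreZ
  rw [if_neg (by omega)]
  by_cases h1 : s.length = 1
  · rw [if_pos h1]
    have hi0 : i = 0 := by omega
    subst hi0
    rw [pvGetD_set_self _ _ _ (by simp [List.length_replicate]; omega)]
    rw [pvZ_zero]
  · rw [if_neg h1]
    have hn2 : 2 ≤ s.length := by omega
    have hscan : pvScan s 1 0 = pvZ s 1 := pvScan_eq s 1 (by omega) 0 (by omega) (by omega)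
    have hr1 : pvZ s 1 < s.length := by
      rcases pvZ_le s 1 with h | h <;> omega
    apply pvZMain_correct s 2 _ _ _ (by omega)
      (by split <;> omega)
      (by split
          · intro hc; omega
          · intro _; omega)
      (by rw [hscan]; exact hr1)
      (by simp)
      ?_ ?_ i hi
    · intro j hj
      match j, hj with
      | 0, _ =>
        rw [pvGetD_set_ne _ _ _ _ (by omega), pvGetD_set_self _ _ _ (by simpa using hn)]
        rw [pvZ_zero]
      | 1, _ =>
        rw [pvGetD_set_self _ _ _ (by simpa using hn2)]
        exact hscan
    · -- box for the initial (l, r)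
      intro i' hi'
      rw [hscan] at hi' ⊢
      by_cases hgt : 0 < pvZ s 1
      · rw [if_pos hgt] at hi' ⊢
        exact pvZ_matches s 1 i' (by omega)
      · rw [if_neg hgt] at hi' ⊢
        have h0 : i' = 0 := by omega
        subst h0
        simp

theorem pvZ_overlap (s : List Char) (t : Nat) (ht : t ≤ s.length) :
    pvZ s t = s.length - t ↔ s.drop t = s.take (s.length - t) := by
  constructor
  · intro h
    apply List.ext_getElem?
    intro i
    by_cases hi : i < s.length - t
    · rw [List.getElem?_drop]
      have hm := pvZ_matches s t i (by omega)
      rw [← hm]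
      rw [List.getElem?_take]
      rw [if_pos hi]
    · rw [List.getElem?_eq_none (by simp; omega), List.getElem?_eq_none (by simp; omega)]
  · intro h
    apply pvZ_eq_of s t (s.length - t) (by omega)
    · intro i hi
      have := congrArg (fun u => u[i]?) h
      simp only [List.getElem?_drop, List.getElem?_take, if_pos hi] at this
      exact this.symm
    · left; omega

theorem pvPP_pos : (0 : Int) < pvPP := by decide

theorem pvPow_emod (b : Int) (k : Nat) (n : Int) : (b % n) ^ k % n = b ^ k % n := by
  induction k with
  | zero => simp
  | succ k ih =>
    rw [pow_succ, pow_succ, Int.mul_emod, ih, Int.emod_emod_of_dvd _ dvd_rfl,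
      Int.mul_emod (b ^ k) b]

theorem pvMulPow_emod (r b : Int) (k : Nat) :
    (r % pvPP * (b % pvPP) ^ k) % pvPP = (r * b ^ k) % pvPP := by
  conv_rhs => rw [Int.mul_emod]
  rw [Int.mul_emod, Int.emod_emod_of_dvd _ dvd_rfl, pvPow_emod]

theorem pvBinpowAux_eq (e : Nat) : ∀ b r : Int, 0 ≤ r → r < pvPP →
    pvBinpowAux b e r = (r * b ^ e) % pvPP := by
  induction e using Nat.strong_induction_on with
  | _ e ih =>
    intro b r hr0 hr1
    rw [pvBinpowAux]
    have h2 : (b * b) ^ (e / 2) = b ^ (2 * (e / 2)) := by rw [pow_mul, pow_two]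
    by_cases he : e / 2 = 0
    · rw [dif_pos he]
      have h01 : e = 0 ∨ e = 1 := by omega
      rcases h01 with h0 | h0 <;> subst h0
      · norm_num [Int.emod_eq_of_lt hr0 hr1]
      · norm_num
    · rw [dif_neg he]
      have hlt : e / 2 < e := Nat.div_lt_self (by omega) (by omega)
      have hr'0 : 0 ≤ (if e % 2 = 1 then r * b % pvPP else r) := by
        split
        · exact Int.emod_nonneg _ (by decide)
        · exact hr0
      have hr'1 : (if e % 2 = 1 then r * b % pvPP else r) < pvPP := by
        split
        · exact Int.emod_lt_of_pos _ pvPP_pos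
        · exact hr1
      rw [ih (e / 2) hlt ((b * b) % pvPP) _ hr'0 hr'1]
      split
      · rename_i hodd
        rw [pvMulPow_emod (r * b) (b * b) (e / 2)]
        congr 1
        rw [h2]
        have he' : e = 2 * (e / 2) + 1 := by omega
        conv_rhs => rw [he']
        rw [pow_succ]
        ring
      · rename_i heven
        have hme := pvMulPow_emod r (b * b) (e / 2)
        rw [Int.emod_eq_of_lt hr0 hr1] at hme
        rw [hme]
        congr 1
        rw [h2]
        have he' : e = 2 * (e / 2) := by omega
        rw [← he']

theorem pvPowModAux_eq (e : Nat) : ∀ b : Int, pvPowModAux b e = b ^ e % pvPP := by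
  induction e using Nat.strong_induction_on with
  | _ e ih =>
    intro b
    rw [pvPowModAux]
    by_cases he : e = 0
    · rw [dif_pos he, he]
      norm_num [pvPP]
    · rw [dif_neg he]
      have hlt : e / 2 < e := Nat.div_lt_self (by omega) (by omega)
      have hsq : ((b * b) % pvPP) ^ (e / 2) % pvPP = b ^ (2 * (e / 2)) % pvPP := by
        rw [pvPow_emod, pow_mul, pow_two]
      rw [ih (e / 2) hlt]
      split
      · rename_i hodd
        rw [Int.mul_emod, Int.emod_emod_of_dvd _ dvd_rfl, hsq]
        have he' : e = 2 * (e / 2) + 1 := by omega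
        conv_rhs => rw [he', pow_succ, Int.mul_emod]
      · rename_i heven
        rw [hsq]
        congr 2
        omega

theorem pvBinpow_eq_powMod (b e : Int) : pvBinpow b e = pvPowMod b e := by
  unfold pvBinpow pvPowMod
  split
  · rfl
  · rw [pvBinpowAux_eq e.toNat b 1 (by norm_num) (by decide), pvPowModAux_eq, pvPow_emod]
    norm_num

theorem pvLoop_bridge (lst : List Int) (m : Int) (sA : PySem.Set Int) (cs : List Char)
    (hs : ∀ d : Int, d < m → (d ∈ sA ↔ 0 ≤ d ∧ cs.drop d.toNat = cs.take (m - d).toNat)) :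
    ∀ n i fc c, lst.length ≤ i + n → 1 ≤ i →
      pvBLoop cs m ((lst.drop (i - 1)).zip (lst.drop i)) (fc + c)
        = (pvALoop lst m sA i fc).map (· + c) := by
  intro n
  induction n with
  | zero =>
    intro i fc c hn h1
    have hge : lst.length ≤ i := by omega
    rw [List.drop_eq_nil_of_le hge, List.zip_nil_right, pvBLoop, pvALoop, dif_neg (by omega)]
    rfl
  | succ n ihn =>
    intro i fc c hn h1
    by_cases hi : i < lst.length
    · have hi1 : i - 1 < lst.length := by omega
      have hii : i - 1 + 1 = i := by omega
      have hstep1 : lst.drop (i - 1) = lst[i - 1] :: lst.drop i := by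
        rw [List.drop_eq_getElem_cons hi1, hii]
      have hstep2 : lst.drop i = lst[i] :: lst.drop (i + 1) := List.drop_eq_getElem_cons hi
      have hzip : (lst.drop (i - 1)).zip (lst.drop i)
          = (lst[i - 1], lst[i]) :: ((lst.drop i).zip (lst.drop (i + 1))) := by
        rw [hstep1]
        nth_rewrite 2 [hstep2]
        rw [List.zip_cons_cons]
      rw [hzip, pvALoop, dif_pos hi, pvBLoop]
      simp only [List.getD_eq_getElem lst 0 hi, List.getD_eq_getElem lst 0 hi1]
      have hrec : ∀ fcA : Int,
          pvBLoop cs m ((lst.drop i).zip (lst.drop (i + 1))) (fcA + c)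
            = (pvALoop lst m sA (i + 1) fcA).map (· + c) := by
        intro fcA
        have := ihn (i + 1) fcA c (by omega) (by omega)
        simpa using this
      by_cases hgt : lst[i] - lst[i - 1] ≥ m
      · rw [if_pos hgt]
        by_cases hgt2 : lst[i] > lst[i - 1] + m
        · rw [if_pos hgt2]
          have hacc : fc + c + (lst[i] - lst[i - 1] - m)
              = (fc + (lst[i] - (lst[i - 1] + m))) + c := by ring
          rw [hacc]
          exact hrec _
        · rw [if_neg hgt2, if_neg (by rintro ⟨hlt, -⟩; omega)]
          have hacc : fc + c + (lst[i] - lst[i - 1] - m) = fc + c := by omega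
          rw [hacc]
          exact hrec _
      · rw [if_neg hgt, if_neg (show ¬(lst[i] > lst[i - 1] + m) by omega)]
        have hd : lst[i] - lst[i - 1] < m := by omega
        have hiff := hs (lst[i] - lst[i - 1]) hd
        by_cases hmem : (lst[i] - lst[i - 1]) ∈ sA
        · rw [if_neg (not_not_intro (hiff.mp hmem)), if_neg (by rintro ⟨-, hno⟩; exact hno hmem)]
          exact hrec _
        · rw [if_pos (fun h => hmem (hiff.mpr h)), if_pos ⟨by omega, hmem⟩]
          rfl
    · have hge : lst.length ≤ i := by omega
      rw [List.drop_eq_nil_of_le hge, List.zip_nil_right, pvBLoop, pvALoop, dif_neg (by omega)]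
      rfl

theorem pvMembership (cs : List Char) (hcs : cs ≠ []) :
    ∀ d : Int, d < (cs.length : Int) →
      (d ∈ PySem.Set.ofList ((PySem.List.pyRange 0 (cs.length : Int) 1).filter
          (fun i => ((pvPreZ cs).getD i.toNat 0 : Int) + i = (cs.length : Int)))
        ↔ 0 ≤ d ∧ cs.drop d.toNat = cs.take ((cs.length : Int) - d).toNat) := by
  intro d hd
  rw [PySem.Set.mem_ofList, List.mem_filter]
  constructor
  · rintro ⟨hmem, hz⟩
    rw [PySem.List.mem_pyRange_one] at hmem
    obtain ⟨h0, hlt⟩ := hmem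
    simp only [decide_eq_true_eq] at hz
    have ht : d.toNat < cs.length := by omega
    rw [pvPreZ_eq cs hcs d.toNat ht] at hz
    have hzv : pvZ cs d.toNat = cs.length - d.toNat := by omega
    have := (pvZ_overlap cs d.toNat (by omega)).mp hzv
    refine ⟨h0, ?_⟩
    have harg : ((cs.length : Int) - d).toNat = cs.length - d.toNat := by omega
    rw [harg]
    exact this
  · rintro ⟨h0, heq⟩
    have ht : d.toNat < cs.length := by omega
    have harg : ((cs.length : Int) - d).toNat = cs.length - d.toNat := by omega
    rw [harg] at heq
    have hzv := (pvZ_overlap cs d.toNat (by omega)).mpr heq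
    constructor
    · rw [PySem.List.mem_pyRange_one]
      exact ⟨h0, hd⟩
    · simp only [decide_eq_true_eq]
      rw [pvPreZ_eq cs hcs d.toNat ht, hzv]
      omega

theorem f_spec' (p : String) (l : List Int) (n : Int) (h : Pre_f p l n) : f p l n = f_alt p l n := by
  unfold Pre_f at h
  by_cases hl : l = []
  · subst hl
    unfold f f_alt
    norm_num
    exact pvBinpow_eq_powMod 26 n
  · rw [if_neg hl] at h
    obtain ⟨hp, -⟩ := h
    have hcs : p.toList ≠ [] := fun hc => hp (String.toList_eq_nil_iff.mp hc)
    have hlen : 1 ≤ l.length := by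
      cases l with
      | nil => exact absurd rfl hl
      | cons a as => simp
    unfold f f_alt
    rw [if_neg (by simpa using hl), if_neg hl]
    have hbridge := pvLoop_bridge l (p.toList.length : Int)
      (PySem.Set.ofList ((PySem.List.pyRange 0 (p.toList.length : Int) 1).filter
        (fun i => ((pvPreZ p.toList).getD i.toNat 0 : Int) + i = (p.toList.length : Int))))
      p.toList (pvMembership p.toList hcs) l.length 1
      (PySem.List.pyGetD l 0 0 - 1)
      (n - (PySem.List.pyGetD l (-1) 0 + (p.toList.length : Int) - 1))
      (by omega) (by omega)
    simp only [List.drop_one] at hbridge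
    rw [List.drop_zero] at hbridge
    show (match pvALoop l (p.toList.length : Int)
        (PySem.Set.ofList ((PySem.List.pyRange 0 (p.toList.length : Int) 1).filter
          (fun i => ((pvPreZ p.toList).getD i.toNat 0 : Int) + i = (p.toList.length : Int))))
        1 (PySem.List.pyGetD l 0 0 - 1) with
      | none => (0 : Int)
      | some fc => pvBinpow 26 (fc + (n - (PySem.List.pyGetD l (-1) 0 + (p.toList.length : Int) - 1))))
      = (match pvBLoop p.toList (p.toList.length : Int) (l.zip l.tail)
          (PySem.List.pyGetD l 0 0 - 1 + n - (PySem.List.pyGetD l (-1) 0 + (p.toList.length : Int) - 1)) with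
      | none => (0 : Int)
      | some fc => pvPowMod 26 fc)
    have hfc : PySem.List.pyGetD l 0 0 - 1 + n - (PySem.List.pyGetD l (-1) 0 + (p.toList.length : Int) - 1)
        = (PySem.List.pyGetD l 0 0 - 1) + (n - (PySem.List.pyGetD l (-1) 0 + (p.toList.length : Int) - 1)) := by
      ring
    rw [hfc, hbridge]
    cases hA : pvALoop l (p.toList.length : Int)
        (PySem.Set.ofList ((PySem.List.pyRange 0 (p.toList.length : Int) 1).filter
          (fun i => ((pvPreZ p.toList).getD i.toNat 0 : Int) + i = (p.toList.length : Int))))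
        1 (PySem.List.pyGetD l 0 0 - 1) with
    | none => rfl
    | some x =>
      simp only [Option.map_some]
      exact pvBinpow_eq_powMod 26 _

-- ===== VERDICT (by name: the statement is the Claim_ definition above) =====
theorem f_spec : Claim_equal_f := by
  intro p l n _ hpre
  unfold Spec_f
  exact f_spec' p l n hpre
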